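/-
  GENERATED by c/gen_frames.py from toy_FRAMES.txt, the PROGRAM only (the base is in the shared library) — do not edit; re-run the script when the image is rebuilt.

  The 1 protected frames of the image (functions with address-taken locals), as `Asan.FrameLayout`s, each with the
  proof `…_ok : ….OK` (by evaluation) that the two lemmas of Asan/Stack.lean ask for. For a frame F of a function entered with
  rsp = RA (pointing at the return address): base = RA − F.raOff; the prologue's stores are `storesMem mem (base / 8) F.prologue`,
  the epilogue's `storesMem mem (base / 8) F.epilogue`. The comment on each store is the address of the instruction.
-/
import Asan.Stack
namespace Toy.Frames
open Asan

/-- `prog_main` (0x105000): base = [rsp+0x0] = RA − 168, 128 bytes. Description string: "1 32 64 9 buffer:66". -/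
def prog_main : FrameLayout where
  name := "prog_main"
  fn := 0x105000
  descr := 0x141300
  raOff := 168
  size := 128
  objs := [
    ⟨"buffer", 32, 64⟩]
  prologue := [
    ⟨0, 4, 0xf1f1f1f1⟩  /- 0x10502e -/,
    ⟨12, 4, 0xf3f3f3f3⟩  /- 0x105038 -/]
  epilogue := [
    ⟨0, 4, 0⟩  /- 0x10504d -/,
    ⟨12, 4, 0⟩  /- 0x105057 -/]
  poison := [
    (0, 0xf1), (1, 0xf1), (2, 0xf1), (3, 0xf1), (12, 0xf3), (13, 0xf3), (14, 0xf3), (15, 0xf3)]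

set_option maxRecDepth 100000 in
/-- The layout of `prog_main` satisfies what the prologue / epilogue lemmas need. -/
theorem prog_main_ok : prog_main.OK := by decide

/-- The protected frames of the image. -/
def all : List FrameLayout := [prog_main]

/-- Every protected frame of the image is well formed. -/
theorem all_ok : ∀ F, F ∈ all → F.OK := by
  intro F hF
  simp only [all, List.mem_cons, List.not_mem_nil, or_false] at hF
  rcases hF with rfl
  · exact prog_main_ok

end Toy.Frames
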